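-- pv_equiv track=rewrite | github.com/SethWoodbury/protein_chisel | scripts/run_metal3d.py | split_pdb_body_and_tail
-- ===== SOURCE A (Python) =====
-- def split_pdb_body_and_tail(lines: list[str]) -> tuple[list[str], list[str]]:
--     """Keep CONECT/MASTER/END records at the end after appended probes."""
--     split_index = len(lines)
--     while split_index > 0:
--         record = lines[split_index - 1][:6].strip()
--         if record in {"CONECT", "MASTER", "END", "ENDMDL"} or not lines[
--             split_index - 1
--         ].strip():
--             split_index -= 1
--             continue
--         break
--     return lines[:split_index], lines[split_index:]
-- ===== SOURCE B (Python) =====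
-- def split_pdb_body_and_tail(lines: list[str]) -> tuple[list[str], list[str]]:
--     """Keep CONECT/MASTER/END records at the end after appended probes."""
--     last_body = -1
--     for i, line in enumerate(lines):
--         record = line[:6].strip()
--         if record not in {"CONECT", "MASTER", "END", "ENDMDL"} and line.strip():
--             last_body = i
--     split_index = last_body + 1
--     return lines[:split_index], lines[split_index:]
-- ===== Notes on version B (the rewrite author's own statement) =====
-- stated objective: alternative
-- what changed: Replaces the backward while-loop that decrements an index past the tail records with a single forward enumerate pass that tracks the index of the last genuine body line and splits after it.
import Mathlib
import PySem

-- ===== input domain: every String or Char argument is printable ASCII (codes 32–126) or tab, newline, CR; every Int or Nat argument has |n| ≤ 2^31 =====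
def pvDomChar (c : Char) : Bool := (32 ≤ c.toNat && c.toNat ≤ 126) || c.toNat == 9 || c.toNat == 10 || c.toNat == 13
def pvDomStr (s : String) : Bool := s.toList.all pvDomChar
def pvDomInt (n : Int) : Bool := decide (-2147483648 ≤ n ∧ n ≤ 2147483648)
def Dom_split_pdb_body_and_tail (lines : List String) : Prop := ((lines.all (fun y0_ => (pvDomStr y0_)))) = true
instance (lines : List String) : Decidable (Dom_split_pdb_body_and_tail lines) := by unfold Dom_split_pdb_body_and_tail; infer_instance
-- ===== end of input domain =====

-- B replaces A's backward while-loop over the tail by one forward pass tracking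
-- the last body-line index (alternative decomposition, same exact result).

-- ===== PORT A =====
-- A's while-loop: split_index counts down from len(lines); each step looks at
-- lines[split_index - 1] and either decrements (continue) or breaks.
def pvALoop (lines : List String) : Nat → Nat
  | 0 => 0
  | k + 1 =>
    let line := (PySem.List.pyGet? lines ((k : Int) + 1 - 1)).getD ""
    let record := PySem.Str.strip (PySem.Str.slice line none (some 6))
    if (record == "CONECT" || record == "MASTER" || record == "END" || record == "ENDMDL")
        || (PySem.Str.strip line == "") then
      pvALoop lines k
    else
      k + 1

def split_pdb_body_and_tail (lines : List String) : List String × List String :=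
  let split_index := pvALoop lines lines.length
  (PySem.List.slice lines none (some (split_index : Int)),
   PySem.List.slice lines (some (split_index : Int)) none)

-- ===== PORT B =====
def pvIsBody (line : String) : Bool :=
  let record := PySem.Str.strip (PySem.Str.slice line none (some 6))
  !(record == "CONECT" || record == "MASTER" || record == "END" || record == "ENDMDL")
    && !(PySem.Str.strip line == "")

def split_pdb_body_and_tail_alt (lines : List String) : List String × List String :=
  let last_body : Int :=
    (PySem.List.enumerate lines 0).foldl
      (fun acc p => if pvIsBody p.2 then p.1 else acc) (-1)
  let split_index := last_body + 1
  (PySem.List.slice lines none (some split_index),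
   PySem.List.slice lines (some split_index) none)

-- ===== PRECONDITION & SPEC =====
def Spec_split_pdb_body_and_tail (lines : List String) (out : List String × List String) : Prop := out = split_pdb_body_and_tail_alt lines
instance (lines : List String) (out : List String × List String) : Decidable (Spec_split_pdb_body_and_tail lines out) := by unfold Spec_split_pdb_body_and_tail; infer_instance

-- ===== CLAIM (what is proved, stated in full; the proofs are below) =====
def Claim_equal_split_pdb_body_and_tail : Prop := ∀ (lines : List String), Dom_split_pdb_body_and_tail lines → Spec_split_pdb_body_and_tail lines (split_pdb_body_and_tail lines)

-- ===== LEMMAS AND PROOFS =====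

-- B's fold step, named for the lemmas.
def pvStep : Int → (Int × String) → Int :=
  fun acc p => if pvIsBody p.2 then p.1 else acc

lemma pvFold_lower (l : List String) (i a : Int) (hi : 0 ≤ i) (ha : -1 ≤ a) :
    -1 ≤ (PySem.List.enumerate l i).foldl pvStep a := by
  induction l generalizing i a with
  | nil => simpa [PySem.List.enumerate_nil]
  | cons s t ih =>
    rw [PySem.List.enumerate_cons]
    simp only [List.foldl_cons, pvStep]
    exact ih (i + 1) _ (by omega) (by split <;> omega)

lemma pvFold_append (l : List String) (s : String) (i a : Int) :
    (PySem.List.enumerate (l ++ [s]) i).foldl pvStep a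
      = if pvIsBody s then i + l.length
        else (PySem.List.enumerate l i).foldl pvStep a := by
  rw [PySem.List.enumerate_append]
  simp [PySem.List.enumerate_cons, PySem.List.enumerate_nil, pvStep]

lemma pvALoop_eq (lines : List String) (k : Nat) (hk : k ≤ lines.length) :
    pvALoop lines k
      = ((PySem.List.enumerate (lines.take k) 0).foldl pvStep (-1) + 1).toNat := by
  induction k with
  | zero => simp [pvALoop, PySem.List.enumerate_nil]
  | succ k ih =>
    have hk' : k < lines.length := by omega
    have htake : lines.take (k + 1) = lines.take k ++ [lines[k]] := by
      rw [List.take_add_one]; simp [List.getElem?_eq_getElem hk']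
    rw [htake, pvFold_append]
    have hget : (PySem.List.pyGet? lines ((k : Int) + 1 - 1)).getD "" = lines[k] := by
      have : (k : Int) + 1 - 1 = ((k : Nat) : Int) := by omega
      rw [this, PySem.List.pyGet?_natCast, List.getElem?_eq_getElem hk']
      rfl
    show pvALoop lines (k + 1) = _
    rw [pvALoop]
    simp only [hget]
    by_cases hb : pvIsBody lines[k]
    · have : ¬ (((PySem.Str.strip (PySem.Str.slice lines[k] none (some 6)) == "CONECT"
          || PySem.Str.strip (PySem.Str.slice lines[k] none (some 6)) == "MASTER"
          || PySem.Str.strip (PySem.Str.slice lines[k] none (some 6)) == "END"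
          || PySem.Str.strip (PySem.Str.slice lines[k] none (some 6)) == "ENDMDL")
          || (PySem.Str.strip lines[k] == "")) = true) := by
        unfold pvIsBody at hb
        simp only [Bool.and_eq_true, Bool.not_eq_true'] at hb
        simp [hb.1, hb.2]
      have hlen : (lines.take k).length = k := List.length_take_of_le (le_of_lt hk')
      simp [hb, this, hlen]
    · have : (((PySem.Str.strip (PySem.Str.slice lines[k] none (some 6)) == "CONECT"
          || PySem.Str.strip (PySem.Str.slice lines[k] none (some 6)) == "MASTER"
          || PySem.Str.strip (PySem.Str.slice lines[k] none (some 6)) == "END"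
          || PySem.Str.strip (PySem.Str.slice lines[k] none (some 6)) == "ENDMDL")
          || (PySem.Str.strip lines[k] == "")) = true) := by
        unfold pvIsBody at hb
        simp only [Bool.and_eq_true, Bool.not_eq_true', not_and_or] at hb
        rcases hb with h | h
        · simp only [Bool.not_eq_false] at h; simp [h]
        · simp only [Bool.not_eq_false] at h; simp [h]
      simp [hb, this]
      exact ih (le_of_lt hk')

-- ===== VERDICT (by name: the statement is the Claim_ definition above) =====
theorem split_pdb_body_and_tail_spec : Claim_equal_split_pdb_body_and_tail := by
  intro lines _
  unfold Spec_split_pdb_body_and_tail split_pdb_body_and_tail split_pdb_body_and_tail_alt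
  have hF : (PySem.List.enumerate lines 0).foldl
      (fun acc p => if pvIsBody p.2 then p.1 else acc) (-1)
      = (PySem.List.enumerate lines 0).foldl pvStep (-1) := rfl
  have hA : pvALoop lines lines.length
      = ((PySem.List.enumerate lines 0).foldl pvStep (-1) + 1).toNat := by
    simpa using pvALoop_eq lines lines.length le_rfl
  have hlb : -1 ≤ (PySem.List.enumerate lines 0).foldl pvStep (-1) :=
    pvFold_lower lines 0 (-1) le_rfl le_rfl
  simp only [hF, hA]
  rw [Int.toNat_of_nonneg (by omega)]
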